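-- pv_equiv track=rewrite | github.com/tcoenen/brp | brp/svg/plotters/histogram.py | merge_bins
-- ===== SOURCE A (Python) =====
-- def merge_bins(bins):
--     out = []
--     begin_x, last_x, value = bins[0]
--
--     for x1, x2, v in bins[1:]:
--         if x1 == last_x and v == value:
--             last_x = x2
--         else:
--             out.append((begin_x, last_x, value))
--             begin_x, last_x, value = x1, x2, v
--     out.append((begin_x, last_x, value))
--
--     return out
-- ===== SOURCE B (Python) =====
-- def merge_bins(bins):
--     # group bins into runs of consecutive mergeable bins, then summarize each run
--     runs = []
--     for b in bins:
--         if runs and runs[-1][-1][1] == b[0] and runs[-1][-1][2] == b[2]: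
--             runs[-1].append(b)
--         else:
--             runs.append([b])
--     return [(r[0][0], r[-1][1], r[0][2]) for r in runs]
-- ===== Notes on version B (the rewrite author's own statement) =====
-- stated objective: alternative
-- what changed: B replaces A's running (begin_x,last_x,value) accumulator with a two-phase decomposition: one pass partitions the bins into runs of contiguous equal-value bins, and a separate comprehension summarizes each run as (first.x1, last.x2, first.value); B returns [] on empty input where A raises.
-- outside the precondition, e.g. on merge_bins([]): A raises IndexError, B returns []
import Mathlib
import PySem

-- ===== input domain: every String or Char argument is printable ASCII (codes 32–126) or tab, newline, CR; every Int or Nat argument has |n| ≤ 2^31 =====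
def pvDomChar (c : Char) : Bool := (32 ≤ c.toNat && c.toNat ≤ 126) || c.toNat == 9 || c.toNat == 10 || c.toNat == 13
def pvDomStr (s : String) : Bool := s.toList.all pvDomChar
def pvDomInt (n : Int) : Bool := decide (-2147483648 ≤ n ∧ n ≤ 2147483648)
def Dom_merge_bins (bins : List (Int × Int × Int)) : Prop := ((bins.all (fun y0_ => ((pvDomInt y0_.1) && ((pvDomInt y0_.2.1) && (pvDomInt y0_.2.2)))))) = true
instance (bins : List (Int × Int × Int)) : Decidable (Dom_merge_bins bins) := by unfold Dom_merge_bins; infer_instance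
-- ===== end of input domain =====

-- B replaces A's running-accumulator merge with a two-phase decomposition (partition into runs,
-- then summarize each run); same O(n) cost, proved equal on non-empty input (A raises on []).


-- ===== PORT A =====
-- state = (out, begin_x, last_x, value); A raises IndexError on [], excluded by Pre_ (value [] here is unreachable)
def merge_bins (bins : List (Int × Int × Int)) : List (Int × Int × Int) :=
  match bins with
  | [] => []
  | (b0, l0, v0) :: rest =>
    let s := rest.foldl
      (fun (st : List (Int × Int × Int) × Int × Int × Int) (t : Int × Int × Int) =>
        if t.1 = st.2.2.1 ∧ t.2.2 = st.2.2.2 then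
          (st.1, st.2.1, t.2.1, st.2.2.2)
        else
          (st.1 ++ [(st.2.1, st.2.2.1, st.2.2.2)], t.1, t.2.1, t.2.2))
      ([], b0, l0, v0)
    s.1 ++ [(s.2.1, s.2.2.1, s.2.2.2)]

-- ===== PORT B =====
-- one step of B's grouping pass: extend the last run or start a new one
def mbStep (runs : List (List (Int × Int × Int))) (b : Int × Int × Int) :
    List (List (Int × Int × Int)) :=
  match runs.getLast? with
  | some r =>
    match r.getLast? with
    | some last =>
      if last.2.1 = b.1 ∧ last.2.2 = b.2.2 then runs.dropLast ++ [r ++ [b]]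
      else runs ++ [[b]]
    | none => runs ++ [[b]]
  | none => [[b]]

-- runs are non-empty by construction, so headD/getLastD defaults are never used (exact for r[0]/r[-1])
def merge_bins_alt (bins : List (Int × Int × Int)) : List (Int × Int × Int) :=
  (bins.foldl mbStep []).map
    (fun r => ((r.headD (0,0,0)).1, (r.getLastD (0,0,0)).2.1, (r.headD (0,0,0)).2.2))

-- ===== PRECONDITION & SPEC =====
-- Pre_ excludes only the empty list, on which A raises IndexError (bins[0]); B returns [] there
def Pre_merge_bins (bins : List (Int × Int × Int)) : Prop := bins ≠ []
instance (bins : List (Int × Int × Int)) : Decidable (Pre_merge_bins bins) := by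
  unfold Pre_merge_bins; infer_instance
def pvWitness_merge_bins : (List (Int × Int × Int)) := [(0,1,5),(1,2,5),(2,3,4)]

def Spec_merge_bins (bins : List (Int × Int × Int)) (out : List (Int × Int × Int)) : Prop :=
  out = merge_bins_alt bins
instance (bins : List (Int × Int × Int)) (out : List (Int × Int × Int)) :
    Decidable (Spec_merge_bins bins out) := by unfold Spec_merge_bins; infer_instance

-- ===== CLAIM (what is proved, stated in full; the proofs are below) =====
def Claim_equal_merge_bins : Prop := ∀ (bins : List (Int × Int × Int)), Dom_merge_bins bins →
  Pre_merge_bins bins → Spec_merge_bins bins (merge_bins bins)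

-- ===== LEMMAS AND PROOFS =====

-- reference merge: exactly A's loop written as structural recursion on the tail
def mergeRef (b l v : Int) : List (Int × Int × Int) → List (Int × Int × Int)
  | [] => [(b, l, v)]
  | (x1, x2, w) :: rest =>
    if x1 = l ∧ w = v then mergeRef b x2 v rest
    else (b, l, v) :: mergeRef x1 x2 w rest

theorem merge_bins_foldA (rest : List (Int × Int × Int)) :
    ∀ (out : List (Int × Int × Int)) (b l v : Int),
    (let s := rest.foldl
      (fun (st : List (Int × Int × Int) × Int × Int × Int) (t : Int × Int × Int) =>
        if t.1 = st.2.2.1 ∧ t.2.2 = st.2.2.2 then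
          (st.1, st.2.1, t.2.1, st.2.2.2)
        else
          (st.1 ++ [(st.2.1, st.2.2.1, st.2.2.2)], t.1, t.2.1, t.2.2))
      (out, b, l, v)
     s.1 ++ [(s.2.1, s.2.2.1, s.2.2.2)]) = out ++ mergeRef b l v rest := by
  induction rest with
  | nil => intro out b l v; simp [mergeRef]
  | cons t rest ih =>
    intro out b l v
    obtain ⟨x1, x2, w⟩ := t
    by_cases h : x1 = l ∧ w = v
    · simp only [List.foldl_cons, mergeRef, if_pos h]
      exact ih out b x2 v
    · simp only [List.foldl_cons, mergeRef, if_neg h]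
      rw [ih (out ++ [(b, l, v)]) x1 x2 w]
      simp

def summ (r : List (Int × Int × Int)) : Int × Int × Int :=
  ((r.headD (0,0,0)).1, (r.getLastD (0,0,0)).2.1, (r.headD (0,0,0)).2.2)

theorem merge_bins_foldB (rest : List (Int × Int × Int)) :
    ∀ (runs0 : List (List (Int × Int × Int))) (r : List (Int × Int × Int))
      (b hb l p v : Int),
      r.head? = some (b, hb, v) → r.getLast? = some (p, l, v) →
    (rest.foldl mbStep (runs0 ++ [r])).map summ = runs0.map summ ++ mergeRef b l v rest := by
  induction rest with
  | nil =>
    intro runs0 r b hb l p v hhead hlast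
    simp [mergeRef, summ, List.headD_eq_head?_getD, List.getLastD_eq_getLast?, hhead, hlast]
  | cons t rest ih =>
    intro runs0 r b hb l p v hhead hlast
    obtain ⟨x1, x2, w⟩ := t
    have hgl : (runs0 ++ [r]).getLast? = some r := by simp
    by_cases h : x1 = l ∧ w = v
    · have hstep : mbStep (runs0 ++ [r]) (x1, x2, w) = runs0 ++ [r ++ [(x1, x2, w)]] := by
        simp only [mbStep, hgl, hlast]
        rw [if_pos ⟨h.1.symm, h.2.symm⟩]
        simp
      simp only [List.foldl_cons, hstep, mergeRef, if_pos h]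
      apply ih runs0 (r ++ [(x1, x2, w)]) b hb x2 x1 v
      · cases r with
        | nil => simp at hhead
        | cons a s => simpa using hhead
      · simp [h.2]
    · have hstep : mbStep (runs0 ++ [r]) (x1, x2, w) = (runs0 ++ [r]) ++ [[(x1, x2, w)]] := by
        simp only [mbStep, hgl, hlast]
        rw [if_neg (by tauto)]
      simp only [List.foldl_cons, hstep, mergeRef, if_neg h]
      rw [ih (runs0 ++ [r]) [(x1, x2, w)] x1 x2 x2 x1 w (by simp) (by simp)]
      simp [summ, List.headD_eq_head?_getD, List.getLastD_eq_getLast?, hhead, hlast]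

-- ===== VERDICT (by name: the statement is the Claim_ definition above) =====
theorem merge_bins_spec : Claim_equal_merge_bins := by
  intro bins _ hpre
  unfold Spec_merge_bins
  cases bins with
  | nil => exact absurd rfl hpre
  | cons hd rest =>
    obtain ⟨b0, l0, v0⟩ := hd
    have hA := merge_bins_foldA rest [] b0 l0 v0
    have hB := merge_bins_foldB rest [] [(b0, l0, v0)] b0 l0 l0 b0 v0 rfl rfl
    simp only [merge_bins, merge_bins_alt]
    rw [hA]
    have : (((b0, l0, v0) :: rest).foldl mbStep []) = rest.foldl mbStep ([] ++ [[(b0, l0, v0)]]) := by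
      simp [mbStep]
    rw [this]
    have hsm : (fun (r : List (Int × Int × Int)) =>
        ((r.headD (0,0,0)).1, (r.getLastD (0,0,0)).2.1, (r.headD (0,0,0)).2.2)) = summ := rfl
    rw [hsm]
    simpa using hB.symm
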